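-- pv_equiv track=rewrite | github.com/Ckevinfl89/whiteboardw7d1 | whiteboard.py | solution
-- ===== SOURCE A (Python) =====
-- def solution(arr):
--     opposites = {"NORTH":"SOUTH","SOUTH":"NORTH", "EAST":"WEST", "WEST":"EAST"}
--     list=[]
--
--     for direction in arr:
--         if list and list[-1] == opposites[direction]:
--             list.pop()
--         else:
--             list.append(direction)
--     return list
-- ===== SOURCE B (Python) =====
-- def solution(arr):
--     opposites = {"NORTH": "SOUTH", "SOUTH": "NORTH", "EAST": "WEST", "WEST": "EAST"}
--     res = list(arr)
--     changed = True
--     while changed: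
--         changed = False
--         i = 0
--         while i + 1 < len(res):
--             if res[i + 1] == opposites[res[i]]:
--                 del res[i:i + 2]
--                 changed = True
--             else:
--                 i += 1
--     return res
-- ===== Notes on version B (the rewrite author's own statement) =====
-- stated objective: alternative
-- what changed: Replaces the single-pass stack (push/pop against the previous kept element) by repeated full scans over a copy of the list that delete any adjacent opposite pair until a whole pass removes nothing; the confluent rewriting reaches the same normal form.
-- outside the precondition, e.g. on solution(['hello', 'NORTH', 'SOUTH']): A returns ['hello'], B raises KeyError; on solution(['NORTH', 'SOUTH', 'hello']): A returns ['hello'], B returns ['hello']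
import Mathlib
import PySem

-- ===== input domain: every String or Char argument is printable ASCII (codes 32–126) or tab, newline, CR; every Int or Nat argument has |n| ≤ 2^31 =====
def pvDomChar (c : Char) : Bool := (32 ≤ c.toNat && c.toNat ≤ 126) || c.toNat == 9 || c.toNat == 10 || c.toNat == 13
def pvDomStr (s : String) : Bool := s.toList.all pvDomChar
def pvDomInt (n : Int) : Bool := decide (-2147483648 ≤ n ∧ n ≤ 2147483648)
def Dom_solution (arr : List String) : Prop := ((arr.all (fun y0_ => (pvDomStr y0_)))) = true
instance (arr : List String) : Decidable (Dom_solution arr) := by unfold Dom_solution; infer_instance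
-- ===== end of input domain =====

-- B replaces A's single-pass push/pop stack by repeated full scans that delete any adjacent
-- opposite pair from a copy of the list until a pass removes nothing (same normal form; alternative, not faster).


-- ===== PORT A =====
def opposites : PySem.Dict String String :=
  PySem.Dict.ofList [("NORTH", "SOUTH"), ("SOUTH", "NORTH"), ("EAST", "WEST"), ("WEST", "EAST")]

-- one loop iteration of A: `if list and list[-1] == opposites[direction]: list.pop() else: list.append(direction)`
def stepA (st : List String) (d : String) : List String :=
  if st = [] then st ++ [d]          -- `list` falsy: the lookup is short-circuited away
  else
    match PySem.Dict.get? opposites d with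
    | some o => if st.getLast? = some o then st.dropLast else st ++ [d]
    | none => st                     -- KeyError in Python; such inputs are outside Pre_solution

def solution (arr : List String) : List String := arr.foldl stepA []

-- ===== PORT B =====
-- inner `while i + 1 < len(res)` scan: `del res[i:i+2]` on an adjacent opposite pair, else `i += 1`.
-- `fuel` is only a structural totality guard: each step deletes two elements or advances i, so
-- `res.length - i` bounds the remaining iterations and fuel = res.length always suffices.
def scanB : Nat → List String → Nat → Bool → List String × Bool
  | 0, res, _, changed => (res, changed)   -- unreachable when fuel ≥ res.length - i
  | fuel+1, res, i, changed =>
    if h : i + 1 < res.length then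
      if some (res[i+1]'h) = PySem.Dict.get? opposites (res[i]'(by omega)) then
        -- `res[i+1] == opposites[res[i]]`: a missing key is a KeyError in Python, outside Pre_solution
        scanB fuel (res.take i ++ res.drop (i+2)) i true
      else
        scanB fuel res (i+1) changed
    else (res, changed)

-- outer `while changed` loop; a changed pass shortens the list, so fuel = length + 1 suffices
def outerB : Nat → List String → List String
  | 0, res => res                          -- unreachable when fuel > res.length
  | fuel+1, res =>
    match scanB res.length res 0 false with
    | (r, true) => outerB fuel r
    | (r, false) => r

def solution_alt (arr : List String) : List String := outerB (arr.length + 1) arr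

-- ===== PRECONDITION & SPEC =====
-- Pre_ admits every list of the four compass strings, plus any list of length ≤ 1 (neither program
-- ever indexes the dict there): it excludes only lists of length ≥ 2 containing a non-direction
-- string, on which A raises KeyError whenever its stack is nonempty at that element and otherwise
-- returns a value by an accident of short-circuit evaluation that B (which looks up every scanned
-- element) does not reproduce.
def Pre_solution (arr : List String) : Prop :=
  arr.length ≤ 1 ∨ ∀ d ∈ arr, d = "NORTH" ∨ d = "SOUTH" ∨ d = "EAST" ∨ d = "WEST"
instance (arr : List String) : Decidable (Pre_solution arr) := by
  unfold Pre_solution; infer_instance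

def pvWitness_solution : List String := (["NORTH", "SOUTH", "EAST"])

def Spec_solution (arr : List String) (out : List String) : Prop := out = solution_alt arr
instance (arr : List String) (out : List String) : Decidable (Spec_solution arr out) := by
  unfold Spec_solution; infer_instance

-- ===== CLAIM (what is proved, stated in full; the proofs are below) =====
def Claim_equal_solution : Prop :=
  ∀ (arr : List String), Dom_solution arr → Pre_solution arr → Spec_solution arr (solution arr)

-- ===== LEMMAS AND PROOFS =====

def ValidS (d : String) : Prop := d = "NORTH" ∨ d = "SOUTH" ∨ d = "EAST" ∨ d = "WEST"

def opp (d : String) : String := (PySem.Dict.get? opposites d).getD ""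

theorem get?_valid (d : String) (h : ValidS d) :
    PySem.Dict.get? opposites d = some (opp d) := by
  rcases h with h | h | h | h <;> subst h <;> decide

theorem opp_opp (d : String) (h : ValidS d) : opp (opp d) = d := by
  rcases h with h | h | h | h <;> subst h <;> decide

theorem valid_opp (d : String) (h : ValidS d) : ValidS (opp d) := by
  rcases h with h | h | h | h <;> subst h <;> unfold ValidS <;> decide

-- A's step on the REVERSED stack (top = head); all reasoning happens on this side
def step' (stk : List String) (d : String) : List String :=
  if stk = [] then [d]
  else
    match PySem.Dict.get? opposites d with
    | some o => if stk.head? = some o then stk.tail else d :: stk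
    | none => stk

theorem stepA_reverse (s : List String) (d : String) :
    stepA s d = (step' s.reverse d).reverse := by
  unfold stepA step'
  by_cases hs : s = []
  · subst hs; simp
  · have hs' : s.reverse ≠ [] := by simpa using hs
    rw [if_neg hs, if_neg hs']
    cases hq : PySem.Dict.get? opposites d with
    | none => simp
    | some o =>
      simp only [List.head?_reverse]
      by_cases hl : s.getLast? = some o
      · rw [if_pos hl, if_pos hl]
        simp only [List.tail_reverse, List.reverse_reverse]
      · rw [if_neg hl, if_neg hl]; simp

theorem foldl_stepA (l : List String) : ∀ s : List String,
    l.foldl stepA s = (l.foldl step' s.reverse).reverse := by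
  induction l with
  | nil => intro s; simp
  | cons d l ih =>
    intro s
    simp only [List.foldl_cons]
    rw [ih, stepA_reverse, List.reverse_reverse]

-- invariant of A's (reversed) stack: no element sits directly on top of its opposite, all valid
def StkInv (stk : List String) : Prop :=
  stk.IsChain (fun x y => x ≠ opp y) ∧ ∀ x ∈ stk, ValidS x

theorem step'_inv (stk : List String) (d : String) (hI : StkInv stk) (hd : ValidS d) :
    StkInv (step' stk d) := by
  obtain ⟨hc, hv⟩ := hI
  unfold step'
  by_cases hs : stk = []
  · subst hs
    refine ⟨by simp, ?_⟩
    intro x hx; simp at hx; subst hx; exact hd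
  · cases stk with
    | nil => exact absurd rfl hs
    | cons x xs =>
      by_cases hx : x = opp d
      · simp only [if_neg hs, get?_valid d hd, List.head?_cons, hx, if_pos rfl, List.tail_cons]
        exact ⟨hc.tail, fun y hy => hv y (List.mem_cons_of_mem _ hy)⟩
      · simp only [if_neg hs, get?_valid d hd, List.head?_cons,
          if_neg (show ¬ (some x = some (opp d)) by simpa using hx)]
        refine ⟨List.isChain_cons_cons.mpr ⟨?_, hc⟩, ?_⟩
        · intro hdx
          exact hx (by rw [hdx, opp_opp x (hv x List.mem_cons_self)])
        · intro y hy
          rcases List.mem_cons.mp hy with h | h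
          · subst h; exact hd
          · exact hv y h

-- the heart: pushing a direction and then its opposite restores the stack
theorem cancel (stk : List String) (a : String) (hI : StkInv stk) (ha : ValidS a) :
    step' (step' stk a) (opp a) = stk := by
  obtain ⟨hc, hv⟩ := hI
  cases stk with
  | nil =>
    have h0 : step' [] a = [a] := by simp [step']
    rw [h0]
    unfold step'
    simp [get?_valid (opp a) (valid_opp a ha), opp_opp a ha]
  | cons x xs =>
    have hne : (x :: xs : List String) ≠ [] := by simp
    by_cases hx : x = opp a
    · have h1 : step' (x :: xs) a = xs := by
        unfold step'
        rw [if_neg hne, get?_valid a ha]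
        simp [hx]
      rw [h1]
      cases xs with
      | nil => simp [step', hx]
      | cons y ys =>
        have hy : x ≠ opp y := (List.isChain_cons_cons.mp hc).1
        have hyne : y ≠ a := by
          intro hya; subst hya
          exact hy (by rw [hx])
        unfold step'
        simp only [if_neg (show ¬ (y :: ys : List String) = [] by simp),
          get?_valid (opp a) (valid_opp a ha), opp_opp a ha, List.head?_cons,
          if_neg (show ¬ (some y = some a) by simpa using hyne)]
        rw [hx]
    · have h1 : step' (x :: xs) a = a :: x :: xs := by
        unfold step'
        simp only [if_neg hne, get?_valid a ha, List.head?_cons,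
          if_neg (show ¬ (some x = some (opp a)) by simpa using hx)]
      rw [h1]
      unfold step'
      simp [get?_valid (opp a) (valid_opp a ha), opp_opp a ha]

-- deleting an adjacent opposite pair anywhere does not change the stack fold
theorem cancel_fold (xs : List String) (a : String) (ys : List String) :
    ∀ stk, StkInv stk → (∀ x ∈ xs, ValidS x) → ValidS a →
    (xs ++ a :: opp a :: ys).foldl step' stk = (xs ++ ys).foldl step' stk := by
  induction xs with
  | nil =>
    intro stk hI _ ha
    simp only [List.nil_append, List.foldl_cons]
    rw [cancel stk a hI ha]
  | cons x xs ih =>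
    intro stk hI hxs ha
    simp only [List.cons_append, List.foldl_cons]
    exact ih _ (step'_inv stk x hI (hxs x List.mem_cons_self))
      (fun y hy => hxs y (List.mem_cons_of_mem _ hy)) ha

-- a list with no adjacent opposite pair is a fixed point of the stack fold
theorem fold_fix (l : List String) : ∀ stk : List String,
    (∀ x ∈ l, ValidS x) → l.IsChain (fun p q => q ≠ opp p) →
    (∀ x p, stk.head? = some x → l.head? = some p → x ≠ opp p) →
    l.foldl step' stk = l.reverse ++ stk := by
  induction l with
  | nil => intro stk _ _ _; simp
  | cons p rest ih =>
    intro stk hv hc hhd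
    have hp : ValidS p := hv p List.mem_cons_self
    have hstep : step' stk p = p :: stk := by
      unfold step'
      by_cases hs : stk = []
      · subst hs; simp
      · cases stk with
        | nil => exact absurd rfl hs
        | cons x xs =>
          simp only [if_neg hs, get?_valid p hp, List.head?_cons,
            if_neg (show ¬ (some x = some (opp p)) by
              simpa using hhd x p rfl rfl)]
    simp only [List.foldl_cons, hstep]
    rw [ih (p :: stk) (fun y hy => hv y (List.mem_cons_of_mem _ hy)) hc.tail ?_]
    · simp
    · intro x q hx hq
      simp only [List.head?_cons, Option.some.injEq] at hx
      subst hx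
      cases rest with
      | nil => simp at hq
      | cons r rs =>
        simp only [List.head?_cons, Option.some.injEq] at hq
        subst hq
        have hqv : ValidS r := hv r (List.mem_cons_of_mem _ List.mem_cons_self)
        have hqp : r ≠ opp p := (List.isChain_cons_cons.mp hc).1
        intro hpq
        exact hqp (by rw [hpq, opp_opp r hqv])

-- each scanB pass keeps elements valid and preserves the stack-fold value (any fuel)
theorem scanB_spec (fuel : Nat) : ∀ (res : List String) (i : Nat) (c : Bool),
    (∀ x ∈ res, ValidS x) →
    (∀ x ∈ (scanB fuel res i c).1, ValidS x) ∧
    (scanB fuel res i c).1.foldl step' [] = res.foldl step' [] := by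
  induction fuel with
  | zero => intro res i c hv; exact ⟨by simpa [scanB] using hv, by simp [scanB]⟩
  | succ f ih =>
    intro res i c hv
    rw [scanB]
    split
    · rename_i h
      split
      · rename_i hop
        have hi : i < res.length := by omega
        have hvi : ValidS (res[i]'hi) := hv _ (List.getElem_mem hi)
        have hop' : res[i+1]'h = opp (res[i]'hi) := by
          rw [get?_valid _ hvi] at hop
          simpa using hop
        have hdec : res = res.take i ++ (res[i]'hi) :: opp (res[i]'hi) :: res.drop (i+2) := by
          conv_lhs => rw [← List.take_append_drop i res]
          congr 1
          rw [List.drop_eq_getElem_cons hi]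
          congr 1
          rw [List.drop_eq_getElem_cons (show i + 1 < res.length by omega), hop']
        have hv' : ∀ x ∈ res.take i ++ res.drop (i+2), ValidS x := by
          intro x hx
          rcases List.mem_append.mp hx with hm | hm
          · exact hv x (List.mem_of_mem_take hm)
          · exact hv x (List.mem_of_mem_drop hm)
        obtain ⟨ihv, ihf⟩ := ih (res.take i ++ res.drop (i+2)) i true hv'
        refine ⟨ihv, ?_⟩
        rw [ihf]
        conv_rhs => rw [hdec]
        rw [cancel_fold (res.take i) (res[i]'hi) (res.drop (i+2)) []
          ⟨List.isChain_nil, by simp⟩ (fun x hx => hv x (List.mem_of_mem_take hx)) hvi]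
      · exact ih res (i+1) c hv
    · exact ⟨hv, rfl⟩

-- a scan never shrinks below what deletions account for: result is never longer
theorem scanB_le (fuel : Nat) : ∀ (res : List String) (i : Nat) (c : Bool),
    (scanB fuel res i c).1.length ≤ res.length := by
  induction fuel with
  | zero => intro res i c; simp [scanB]
  | succ f ih =>
    intro res i c
    rw [scanB]
    split
    · rename_i h
      split
      · have h1 := ih (res.take i ++ res.drop (i+2)) i true
        have h2 : (res.take i ++ res.drop (i+2)).length = res.length - 2 := by
          simp [List.length_take, List.length_drop]; omega
        omega
      · exact ih res (i+1) c
    · exact Nat.le_refl _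

-- a scan never turns `changed` back off
theorem scanB_snd_true (fuel : Nat) : ∀ (res : List String) (i : Nat) (c : Bool), c = true →
    (scanB fuel res i c).2 = true := by
  induction fuel with
  | zero => intro res i c hc; simpa [scanB] using hc
  | succ f ih =>
    intro res i c hc
    rw [scanB]
    split
    · split
      · exact ih _ _ _ rfl
      · exact ih _ _ _ hc
    · exact hc

-- a pass that reports a change shortened the list
theorem scanB_true_len (fuel : Nat) : ∀ (res : List String) (i : Nat) (c : Bool),
    (scanB fuel res i c).2 = true →
    c = true ∨ (scanB fuel res i c).1.length < res.length := by
  induction fuel with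
  | zero => intro res i c h; left; simpa [scanB] using h
  | succ f ih =>
    intro res i c h
    rw [scanB] at h ⊢
    split at h
    · rename_i hlt
      split at h
      · rename_i hop
        right
        have h1 := scanB_le f (res.take i ++ res.drop (i+2)) i true
        have h2 : (res.take i ++ res.drop (i+2)).length = res.length - 2 := by
          simp [List.length_take, List.length_drop]; omega
        simp only [dif_pos hlt, if_pos hop]
        omega
      · rename_i hop
        rcases ih res (i+1) c h with h' | h'
        · exact Or.inl h'
        · right; simpa only [dif_pos hlt, if_neg hop] using h'
    · exact Or.inl h

-- with sufficient fuel, a pass that reports no change left the list alone,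
-- and it has no adjacent opposite pair from position i on
theorem scanB_done (fuel : Nat) : ∀ (res : List String) (i : Nat) (c : Bool) (r : List String),
    res.length - i ≤ fuel → scanB fuel res i c = (r, false) →
    r = res ∧ ∀ j, i ≤ j → ∀ (hj : j + 1 < res.length),
      ¬ (some (res[j+1]'hj) = PySem.Dict.get? opposites (res[j]'(by omega))) := by
  induction fuel with
  | zero =>
    intro res i c r hf h
    simp only [scanB, Prod.mk.injEq] at h
    exact ⟨h.1.symm, fun j hij hj => absurd hj (by omega)⟩
  | succ f ih =>
    intro res i c r hf h
    rw [scanB] at h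
    split at h
    · rename_i hlt
      split at h
      · exfalso
        have h2 := scanB_snd_true f (res.take i ++ res.drop (i+2)) i true rfl
        rw [h] at h2
        simp at h2
      · rename_i hop
        obtain ⟨hr, hprop⟩ := ih res (i+1) c r (by omega) h
        refine ⟨hr, ?_⟩
        intro j hij hj
        rcases Nat.lt_or_ge i j with hij' | hij'
        · exact hprop j (by omega) hj
        · have hji : j = i := by omega
          subst hji
          exact hop
    · cases h
      rename_i hlt
      exact ⟨rfl, fun j hij hj => absurd hj (by omega)⟩

-- with fuel > length, the outer loop reaches the irreducible list = the stack fold's value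
theorem outerB_spec (fuel : Nat) : ∀ (res : List String), res.length < fuel →
    (∀ x ∈ res, ValidS x) → outerB fuel res = (res.foldl step' []).reverse := by
  induction fuel with
  | zero => intro res hf; omega
  | succ f ih =>
    intro res hf hv
    rw [outerB]
    cases hp : scanB res.length res 0 false with
    | mk r b =>
      obtain ⟨hrv, hrf⟩ := scanB_spec res.length res 0 false hv
      rw [hp] at hrv hrf
      cases b with
      | true =>
        have hlen : r.length < res.length := by
          rcases scanB_true_len res.length res 0 false (by rw [hp]) with h' | h'
          · exact absurd h' (by decide)
          · rw [hp] at h'; exact h'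
        show outerB f r = (res.foldl step' []).reverse
        rw [ih r (by omega) hrv, hrf]
      | false =>
        obtain ⟨hr, hprop⟩ := scanB_done res.length res 0 false r (by omega) hp
        show r = (res.foldl step' []).reverse
        subst hr
        have hchain : r.IsChain (fun p q => q ≠ opp p) := by
          rw [List.isChain_iff_getElem]
          intro j hj heq
          apply hprop j (Nat.zero_le j) hj
          rw [heq, get?_valid _ (hv _ (List.getElem_mem (by omega)))]
        rw [fold_fix r [] hv hchain (by intro x p hx _; simp at hx)]
        simp

-- ===== VERDICT (by name: the statement is the Claim_ definition above) =====
theorem solution_spec : Claim_equal_solution := by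
  intro arr _ hpre
  unfold Spec_solution
  rcases hpre with hlen | hvalid
  · cases arr with
    | nil => rfl
    | cons x t =>
      cases t with
      | nil => simp [solution, solution_alt, stepA, outerB, scanB]
      | cons y t' => simp at hlen
  · unfold solution solution_alt
    rw [foldl_stepA arr []]
    rw [outerB_spec (arr.length + 1) arr (by omega) (fun x hx => hvalid x hx)]
    rfl
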